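/- GENERATED by mk_final_copies.py from the proof of the farm's unit `vorbis_decode_packet_rest.9` (farm:vorbis_decode_packet_rest.9.2: Lemmas.lean) as the
   re-elaboration sweep compiled it — do not edit. -/
import Asan.CheckWalk
import Vorbis.Spec.PacketRestFrame
import Vorbis.Spec.DecodeResidue
import Vorbis.Spec.Units.vorbis_decode_packet_rest_9

open X86 X86.User Asan Vorbis Vorbis.Spec Vorbis.Spec.vorbis_decode_packet_rest

set_option maxRecDepth 4000
set_option maxHeartbeats 4000000

namespace Vorbis.Spec.vorbis_decode_packet_rest_9

/-- The configuration values the assertions mention (`n`, `map`, the channel count) read the same in a memory that keeps `*f`. -/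
theorem cfg_kept {mem mem' : Mem} {f mode : Nat} (hk : (objBlock f).Kept mem mem') (hm : mode < 64) :
    nOf mem' f (stb_vorbis.mode_config_at f mode) = nOf mem f (stb_vorbis.mode_config_at f mode) ∧
    mapOf mem' f (stb_vorbis.mode_config_at f mode) = mapOf mem f (stb_vorbis.mode_config_at f mode) ∧
    nchan mem' f = nchan mem f := by
  unfold nOf mapOf bsize nchan
  simp only [vacc, voff]
  have e1 := hk.u8 (f + 484 + 6 * mode + 0) (by simp only [objBlock]; omega) (by simp only [objBlock, voff]; omega)
  have e2 := hk.u8 (f + 484 + 6 * mode + 1) (by simp only [objBlock]; omega) (by simp only [objBlock, voff]; omega)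
  have e3 := hk.i32 (f + 152) (by simp only [objBlock]; omega) (by simp only [objBlock, voff]; omega)
  have e4 := hk.i32 (f + 156) (by simp only [objBlock]; omega) (by simp only [objBlock, voff]; omega)
  have e5 := hk.u64 (f + 472) (by simp only [objBlock]; omega) (by simp only [objBlock, voff]; omega)
  have e6 := hk.i32 (f + 4) (by simp only [objBlock]; omega) (by simp only [objBlock, voff]; omega)
  rw [e1, e2, e3, e4, e5, e6]
  exact ⟨rfl, rfl, rfl⟩

/-- The four objects of the function's own protected frame are objects of the live list inside the function. -/
theorem frame_obj_mem (others : List Obj) (frames : List (Nat × FrameLayout)) (u : State) (off size : Nat)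
    (h : (off = 32 ∧ size = 128) ∨ (off = 192 ∧ size = 256) ∨ (off = 512 ∧ size = 1024) ∨ (off = 1664 ∧ size = 1024)) :
    (⟨(u.reg .rsp).toNat - 2872 + off, size, .stack⟩ : Obj) ∈ stackObjs (framesIn frames u) ++ others := by
  unfold framesIn
  rw [stackObjs_cons]
  apply List.mem_append_left
  apply List.mem_append_left
  unfold FrameLayout.objsAt Vorbis.Frames.vorbis_decode_packet_rest
  simp only [List.map_cons, List.map_nil, List.mem_cons, List.mem_nil_iff, or_false]
  rcases h with ⟨rfl, rfl⟩ | ⟨rfl, rfl⟩ | ⟨rfl, rfl⟩ | ⟨rfl, rfl⟩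
  · exact Or.inl rfl
  · exact Or.inr (Or.inl rfl)
  · exact Or.inr (Or.inr (Or.inl rfl))
  · exact Or.inr (Or.inr (Or.inr rfl))

/-- The windows of the own frame the segment stores to: the scratch slots `[rsp]`, `[rsp + 8]` and everything below the steady
stack pointer (return addresses of the calls, the callees' frames); `residue_buffers`; `do_not_decode`. As numbers over `R`, the
entry stack pointer. -/
def ownWins (R : Nat) : List Span := [⟨R - 3856, R - 2984⟩, ⟨R - 2840, R - 2712⟩, ⟨R - 2680, R - 2424⟩]

/-- A read off the three windows of `ownWins` sees the same bytes. -/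
theorem own_read {m m' : Mem} {R : Nat} (hs : Mem.SameExcept (ownWins R) m m') (a : Word) (k : Nat)
    (h3 : a.toNat + k < 2 ^ 64)
    (hd : (R - 2984 ≤ a.toNat ∧ a.toNat + k ≤ R - 2840) ∨ (R - 2712 ≤ a.toNat ∧ a.toNat + k ≤ R - 2680) ∨
      R - 2424 ≤ a.toNat ∨ a.toNat + k ≤ R - 3856) :
    m'.readLE a k = m.readLE a k := by
  apply hs.readLE a k h3
  intro w hw
  unfold ownWins at hw
  simp only [List.mem_cons, List.mem_nil_iff, or_false] at hw
  rcases hw with rfl | rfl | rfl <;> simp only [] <;> omega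

/-- **STABLE over the segment's own stores**: a memory that differs from the one of a state with `Stable` only inside `ownWins`
(no spill slot of STABLE, no saved register, no shadow byte, no allocated block) has `Stable` again; the configuration values read
the same. -/
theorem stable_own {u₀ : State} {others : List Obj} {frames : List (Nat × FrameLayout)} {len : Nat} {Ar : Arena}
    {stored room : Int} {mode : Nat} {ysz : Nat → Nat} {u : State} {ret : Word} {ls : Int} {v s : State}
    (hst : Stable u₀ others frames len Ar stored room mode ysz u ret ls v)
    (hs : Mem.SameExcept (ownWins (u.reg .rsp).toNat) v.mem s.mem)
    (hrsp : s.reg .rsp = spOf u) (hcode : Vorbis.CodeOK u₀ s.mem) (habi : abiInv s) :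
    Stable u₀ others frames len Ar stored room mode ysz u ret ls s ∧
      AllKept (RunBlk Ar len) v.mem s.mem ∧
      mapOf s.mem (fOf u) (mOf u) = mapOf v.mem (fOf u) (mOf u) ∧
      nchan s.mem (fOf u) = nchan v.mem (fOf u) := by
  have he := hst.entry
  u_entry he
  simp only [vspec, Vorbis.conv_stackLo, Vorbis.conv_stackHi] at he_room he_top
  obtain ⟨hsh, hinv0, hargs⟩ := hst.pre
  have hok := hst.inv.ok
  -- no allocated block meets the stack region
  have hk : AllKept (RunBlk Ar len) v.mem s.mem := by
    apply AllKept.of_sameExcept hok hs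
    intro B hB w hw
    have hoff := hst.inv.offStack B hB
    unfold ownWins at hw
    simp only [List.mem_cons, List.mem_nil_iff, or_false] at hw
    rcases hw with rfl | rfl | rfl <;> simp only [] <;> omega
  have hun : ShadowUntouched v.mem s.mem := by
    unfold ShadowUntouched
    apply hs.eqOn
    intro w hw
    unfold ownWins at hw
    simp only [List.mem_cons, List.mem_nil_iff, or_false] at hw
    rcases hw with rfl | rfl | rfl <;> simp only [] <;> omega
  have hshadow : ShadowInv others (framesIn frames u) (spOf u).toNat s.mem := hst.shadow.untouched hun
  have hinv : DecodeInv others (framesIn frames u) len Ar stored room ysz s.mem (fOf u) :=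
    hst.inv.carry hst.shadow hk hshadow
  have hmode : mode < 64 := ModeOK.mode_index_lt hinv0.fb.vorbis.mode hargs.mode_lt
  have hcfg := cfg_kept (hk _ hst.inv.ob1) hmode
  rw [← hargs.m_eq] at hcfg
  obtain ⟨c1, c2, c3⟩ := hcfg
  -- where `p_left` is: a stack object of a caller, at or above the caller's stack pointer
  have hpl := hargs.left_obj.1.above hsh.inv
  have hpl2 := hargs.left_obj.2
  have hleft : s.mem.i32 (pLeftOf u) = v.mem.i32 (pLeftOf u) := by
    have hkk : (Block.mk (pLeftOf u) 4).Kept v.mem s.mem := by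
      apply Block.Kept.of_sameExcept hs
      · intro w hw
        unfold ownWins at hw
        simp only [List.mem_cons, List.mem_nil_iff, or_false] at hw
        rcases hw with rfl | rfl | rfl <;> simp only [] <;> omega
      · simp only []
        omega
    exact hkk.i32 _ (Nat.le_refl _) (Nat.le_refl _)
  refine ⟨⟨⟨hst.entry, hst.pre, hrsp, hcode, habi, ?_, ?_, ?_, ?_, ?_, ?_, ?_, ?_, hshadow, hinv⟩,
    ?_, ?_, ?_, ?_, ?_, ?_, ?_, ?_, ?_, ?_, ?_⟩, hk, c2, c3⟩
  · -- the footprint so far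
    apply hst.same.step_same hs
    intro w hw a h1 h2
    apply covered_footprint
    left
    unfold ownWins at hw
    simp only [List.mem_cons, List.mem_nil_iff, or_false] at hw
    rcases hw with rfl | rfl | rfl <;> simp only [] at h1 h2 <;> omega
  · rw [own_read hs _ _ (by u_omega) (by u_omega)]
    exact hst.ra
  · rw [own_read hs _ _ (by u_omega) (by u_omega)]
    exact hst.s_r15
  · rw [own_read hs _ _ (by u_omega) (by u_omega)]
    exact hst.s_r14
  · rw [own_read hs _ _ (by u_omega) (by u_omega)]
    exact hst.s_r13
  · rw [own_read hs _ _ (by u_omega) (by u_omega)]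
    exact hst.s_r12
  · rw [own_read hs _ _ (by u_omega) (by u_omega)]
    exact hst.s_rbp
  · rw [own_read hs _ _ (by u_omega) (by u_omega)]
    exact hst.s_rbx
  · show s.mem.readLE (spOf u + 0x40) 8 = _
    rw [own_read hs _ _ (by u_omega) (by u_omega)]
    exact hst.slot_f
  · show s.mem.readLE (spOf u + 0x68) 8 = _
    rw [own_read hs _ _ (by u_omega) (by u_omega)]
    exact hst.slot_len
  · show s.mem.readLE (spOf u + 0x70) 8 = _
    rw [own_read hs _ _ (by u_omega) (by u_omega)]
    exact hst.slot_m
  · show sint32 (s.mem.readLE (spOf u + 0x78) 4) = _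
    rw [own_read hs _ _ (by u_omega) (by u_omega)]
    exact hst.slot_ls
  · show sint32 (s.mem.readLE (spOf u + 0x7c) 4) = _
    rw [own_read hs _ _ (by u_omega) (by u_omega)]
    exact hst.slot_rs
  · show s.mem.readLE (spOf u + 0x50) 4 = _
    rw [own_read hs _ _ (by u_omega) (by u_omega), c1]
    exact hst.slot_n
  · show s.mem.readLE (spOf u + 0x3c) 4 = _
    rw [own_read hs _ _ (by u_omega) (by u_omega), c1]
    exact hst.slot_n2
  · show s.mem.readLE (spOf u + 0x60) 8 = _
    rw [own_read hs _ _ (by u_omega) (by u_omega)]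
    exact hst.slot_sb
  · rw [own_read hs _ _ (by u_omega) (by u_omega)]
    exact hst.arg_re
  · rw [own_read hs _ _ (by u_omega) (by u_omega)]
    exact hst.arg_left
  · rw [hleft]
    exact hst.left_val

/-- The configuration's windows of `*f` read as at the function's entry in every memory that differs from the entry memory inside
the function's footprint only (`Frame.same`). -/
theorem objEq_of_same {others : List Obj} {frames : List (Nat × FrameLayout)} {len : Nat} {Ar : Arena}
    {stored room : Int} {mode : Nat} {ysz : Nat → Nat} {u : State} {m : Mem}
    (hpre : (vorbis_decode_packet_rest.spec others frames len Ar stored room mode ysz).pre u)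
    (hroom : 0x700000 + 3856 ≤ (u.reg .rsp).toNat)
    (hsame : Mem.SameExcept ((vorbis_decode_packet_rest.spec others frames len Ar stored room mode ysz).footprint u) u.mem m) :
    ObjEq ConfigOK.wins u.mem (fOf u) m (fOf u) := by
  have hinv0 := hpre.2.1
  obtain ⟨_, _, hd⟩ := hinv0.config.frame_stores hinv0.ok hinv0.ob1 hinv0.sep hsame
    (fun s hs => footprint_storeOK hpre hroom s hs)
  exact hd.sub ConfigOK.wins_decode

/-- **No span of decode_residue's footprint meets the stack at or above its return address** (`DecodeResidue.Entered.footprint_stack`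
from the precondition alone): the caller's frame is not written. -/
theorem callee_footprint_stack {len : Nat} {A : Arena} {others : List Obj} {frames : List (Nat × FrameLayout)}
    {stored room : Int} {ysz : Nat → Nat} {e : State}
    (hpre : DecodeResidue.Pre len A others frames stored room ysz e) (s : Span)
    (hs : s ∈ (decode_residue.spec len A others frames stored room ysz).footprint e) :
    s.hi ≤ (e.reg .rsp).toNat ∨ s.hi ≤ 0x700000 ∨ 0x800000 ≤ s.lo := by
  have hob : RunBlk A len (objBlock (e.reg .rdi).toNat) := hpre.vorbis.obj
  have hobst := hpre.free.offStack _ hob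
  simp only [vblock, voff] at hobst
  have h1x := hpre.ado.ok.AR1x
  have h2 := hpre.ado.ok.AR2
  unfold Spec.footprint at hs
  rcases List.mem_cons.mp hs with rfl | hs
  · left
    exact Nat.le_refl _
  · have hs' : s ∈ DecodeResidue.writes A e := hs
    unfold DecodeResidue.writes at hs'
    right
    rcases List.mem_append.mp hs' with hfix | hbuf
    · simp only [List.mem_cons, List.mem_nil_iff, or_false] at hfix
      rcases hfix with rfl | rfl | rfl | rfl | rfl | rfl | rfl | rfl
      · simp only []
        omega
      · simp only []
        omega
      · simp only []
        omega
      · simp only []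
        omega
      · simp only []
        omega
      · simp only []
        omega
      · unfold shadowSpan
        simp only []
        omega
      · unfold shadowSpan
        simp only []
        omega
    · obtain ⟨c, hc, rfl⟩ := List.mem_map.mp hbuf
      have hc' : c < nchan e.mem (e.reg .rdi).toNat := List.mem_range.mp hc
      have hcint : (c : Int) < stb_vorbis.channels e.mem (e.reg .rdi).toNat := by
        rw [nchan_def] at hc'
        omega
      have hB : RunBlk A len ⟨stb_vorbis.channel_buffers e.mem (e.reg .rdi).toNat c, 4 * bsize e.mem (e.reg .rdi).toNat 1⟩ :=
        SampleBuf.blk hpre.vorbis.config (SampleBuf.chan c hcint)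
      have := hpre.free.offStack _ hB
      simp only [] at this ⊢
      omega

/-- The configuration values read the same in two memories in which the configuration's windows of `*f` read the same. -/
theorem cfg_objEq {mem mem' : Mem} {f mode : Nat} (he : ObjEq ConfigOK.wins mem f mem' f) (hm : mode < 64) :
    nOf mem' f (stb_vorbis.mode_config_at f mode) = nOf mem f (stb_vorbis.mode_config_at f mode) ∧
    mapOf mem' f (stb_vorbis.mode_config_at f mode) = mapOf mem f (stb_vorbis.mode_config_at f mode) ∧
    nchan mem' f = nchan mem f := by
  unfold nOf mapOf bsize nchan
  simp only [vacc, voff]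
  have e1 := he.u8 (484 + 6 * mode + 0) (InWins.of_mem (144, 1000) (by decide) (by simp only []; omega) (by simp only []; omega))
  have e2 := he.u8 (484 + 6 * mode + 1) (InWins.of_mem (144, 1000) (by decide) (by simp only []; omega) (by simp only []; omega))
  have e3 := he.i32 152 (by decide)
  have e4 := he.i32 156 (by decide)
  have e5 := he.u64 472 (by decide)
  have e6 := he.i32 4 (by decide)
  simp only [← Nat.add_assoc] at e1 e2
  rw [e1, e2, e3, e4, e5, e6]
  exact ⟨rfl, rfl, rfl⟩

/-- **Every byte of decode_residue's footprint, called from the steady frame, is a byte of the function's own footprint**: the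
`hsub` of `Mem.SameExcept.step_same` that extends `Frame.same` over the call. -/
theorem callee_covered {others : List Obj} {frames : List (Nat × FrameLayout)} {len : Nat} {Ar : Arena}
    {stored room : Int} {mode : Nat} {ysz : Nat → Nat} {u c : State} (fr : List (Nat × FrameLayout))
    (hpre : (vorbis_decode_packet_rest.spec others frames len Ar stored room mode ysz).pre u)
    (hroom : 0x700000 + 3856 ≤ (u.reg .rsp).toNat)
    (hsame : Mem.SameExcept ((vorbis_decode_packet_rest.spec others frames len Ar stored room mode ysz).footprint u) u.mem c.mem)
    (hcrsp : (c.reg .rsp).toNat = (u.reg .rsp).toNat - 3008) (hcrdi : (c.reg .rdi).toNat = fOf u) :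
    ∀ w, w ∈ (decode_residue.spec len Ar others fr stored room ysz).footprint c → ∀ a : Nat, w.lo ≤ a → a < w.hi →
      Covered Ar ysz u a := by
  intro w hw a h1 h2
  have he := objEq_of_same hpre hroom hsame
  have hC := hpre.2.1.config.header.HD1.2
  obtain ⟨ech, eb1, eptr⟩ := ConfigOK.buffers_eq he hC
  unfold Spec.footprint at hw
  rcases List.mem_cons.mp hw with rfl | hw
  · left
    simp only [vspec] at h1 h2
    omega
  · have hw' : w ∈ DecodeResidue.writes Ar c := hw
    unfold DecodeResidue.writes at hw'
    rw [hcrdi] at hw'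
    rcases List.mem_append.mp hw' with hfix | hbuf
    · simp only [List.mem_cons, List.mem_nil_iff, or_false] at hfix
      rcases hfix with rfl | rfl | rfl | rfl | rfl | rfl | rfl | rfl
      · right; left
        exact ⟨⟨fOf u + 48, fOf u + 56⟩, by unfold holes; simp only [List.mem_cons, true_or], by simp only [] at h1 ⊢; omega,
          by simp only [] at h2 ⊢; omega⟩
      · right; left
        exact ⟨⟨fOf u + 80, fOf u + 112⟩, by unfold holes; simp only [List.mem_cons, true_or, or_true],
          by simp only [] at h1 ⊢; omega, by simp only [] at h2 ⊢; omega⟩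
      · right; left
        exact ⟨⟨fOf u + 132, fOf u + 144⟩, by unfold holes; simp only [List.mem_cons, true_or, or_true],
          by simp only [] at h1 ⊢; omega, by simp only [] at h2 ⊢; omega⟩
      · right; left
        exact ⟨⟨fOf u + 1480, fOf u + 1808⟩, by unfold holes; simp only [List.mem_cons, true_or, or_true],
          by simp only [] at h1 ⊢; omega, by simp only [] at h2 ⊢; omega⟩
      · right; left
        exact ⟨⟨fOf u + 1480, fOf u + 1808⟩, by unfold holes; simp only [List.mem_cons, true_or, or_true],
          by simp only [] at h1 ⊢; omega, by simp only [] at h2 ⊢; omega⟩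
      · right; right; right; right; left
        exact ⟨h1, h2⟩
      · right; right; right; right; right; right; right; right
        exact ⟨h1, h2⟩
      · right; right; right; right; right; right; right; left
        unfold shadowSpan at h1 h2 ⊢
        simp only [] at h1 h2 ⊢
        omega
    · obtain ⟨k, hk, rfl⟩ := List.mem_map.mp hbuf
      have hk' : k < nchan c.mem (fOf u) := List.mem_range.mp hk
      have hkint : (k : Int) < stb_vorbis.channels u.mem (fOf u) := by
        rw [nchan_def, ech] at hk'
        omega
      right; right; right; left
      refine ⟨k, ?_, ?_, ?_⟩
      · rw [nchan_def]
        omega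
      · simp only [] at h1
        rw [(eptr k hkint).1] at h1
        exact h1
      · simp only [] at h2
        rw [(eptr k hkint).1, eb1] at h2
        exact h2

/-- The shadow layer and the decode-time invariant over the segment's own stores, at the level of memories (for the state at the
callee's entry, whose stack pointer is not the steady one). -/
theorem inv_own {u₀ : State} {others : List Obj} {frames : List (Nat × FrameLayout)} {len : Nat} {Ar : Arena}
    {stored room : Int} {mode : Nat} {ysz : Nat → Nat} {u : State} {ret : Word} {ls : Int} {v : State} {m : Mem}
    (hst : Stable u₀ others frames len Ar stored room mode ysz u ret ls v)
    (hs : Mem.SameExcept (ownWins (u.reg .rsp).toNat) v.mem m) :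
    ShadowInv others (framesIn frames u) (spOf u).toNat m ∧
      DecodeInv others (framesIn frames u) len Ar stored room ysz m (fOf u) := by
  have he := hst.entry
  u_entry he
  simp only [vspec, Vorbis.conv_stackLo, Vorbis.conv_stackHi] at he_room he_top
  have hk : AllKept (RunBlk Ar len) v.mem m := by
    apply AllKept.of_sameExcept hst.inv.ok hs
    intro B hB w hw
    have hoff := hst.inv.offStack B hB
    unfold ownWins at hw
    simp only [List.mem_cons, List.mem_nil_iff, or_false] at hw
    rcases hw with rfl | rfl | rfl <;> simp only [] <;> omega
  have hun : ShadowUntouched v.mem m := by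
    unfold ShadowUntouched
    apply hs.eqOn
    intro w hw
    unfold ownWins at hw
    simp only [List.mem_cons, List.mem_nil_iff, or_false] at hw
    rcases hw with rfl | rfl | rfl <;> simp only [] <;> omega
  have hshadow : ShadowInv others (framesIn frames u) (spOf u).toNat m := hst.shadow.untouched hun
  exact ⟨hshadow, hst.inv.carry hst.shadow hk hshadow⟩

/-- A read of the caller's frame (at or above the callee's return address) through decode_residue's footprint. -/
theorem callee_read {len : Nat} {A : Arena} {others : List Obj} {frames : List (Nat × FrameLayout)}
    {stored room : Int} {ysz : Nat → Nat} {c r : State}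
    (hpre : DecodeResidue.Pre len A others frames stored room ysz c)
    (hsame : Mem.SameExcept ((decode_residue.spec len A others frames stored room ysz).footprint c) c.mem r.mem)
    (a : Word) (k : Nat) (h1 : (c.reg .rsp).toNat ≤ a.toNat) (h0 : 0x700000 ≤ a.toNat) (h2 : a.toNat + k ≤ 0x800000) :
    r.mem.readLE a k = c.mem.readLE a k := by
  apply hsame.readLE a k (by omega)
  intro w hw
  have := callee_footprint_stack hpre w hw
  omega

/-- A block of the caller's frame (at or above the callee's return address) is kept by decode_residue. -/
theorem callee_kept {len : Nat} {A : Arena} {others : List Obj} {frames : List (Nat × FrameLayout)}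
    {stored room : Int} {ysz : Nat → Nat} {c r : State}
    (hpre : DecodeResidue.Pre len A others frames stored room ysz c)
    (hsame : Mem.SameExcept ((decode_residue.spec len A others frames stored room ysz).footprint c) c.mem r.mem)
    (B : Block) (h1 : (c.reg .rsp).toNat ≤ B.base) (h0 : 0x700000 ≤ B.base) (h2 : B.base + B.size ≤ 0x800000) :
    B.Kept c.mem r.mem := by
  apply Block.Kept.of_sameExcept hsame
  · intro w hw
    have := callee_footprint_stack hpre w hw
    omega
  · omega

/-- **STABLE over the call of decode_residue**: `p` is a state with `Stable` (steady rsp), `c` the state at the callee's entry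
(its memory differs from `p`'s by own stores: the scratch slots, the pushed return address), `r` the state after the return.
`htop24` — the stack argument `p_left` at `[rsp + 16, rsp + 24)` lies in the stack region — was the missing precondition of the
farm report (CONTRACT-PRE, attempt 1); since freeze-7 it is `Args.args_top` (from `Args.left_above`): derived inside the proof, used
for the field `arg_left` only. -/
theorem stable_call {u₀ : State} {others : List Obj} {frames : List (Nat × FrameLayout)} {len : Nat} {Ar : Arena}
    {stored room : Int} {mode : Nat} {ysz : Nat → Nat} {u : State} {ret : Word} {ls : Int} {p c r : State}
    (hst : Stable u₀ others frames len Ar stored room mode ysz u ret ls p)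
    (hpush : Mem.SameExcept (ownWins (u.reg .rsp).toNat) p.mem c.mem)
    (hcrsp : c.reg .rsp = spOf u - 8) (hcrdi : (c.reg .rdi).toNat = fOf u)
    (hpre : DecodeResidue.Pre len Ar others (framesIn frames u) stored room ysz c)
    (hsame : Mem.SameExcept ((decode_residue.spec len Ar others (framesIn frames u) stored room ysz).footprint c) c.mem r.mem)
    (hpost : DecodeResidue.Post len Ar others (framesIn frames u) stored room ysz c r)
    (hrsp : r.reg .rsp = spOf u) (hcode : Vorbis.CodeOK u₀ r.mem) (habi : abiInv r) :
    Stable u₀ others frames len Ar stored room mode ysz u ret ls r ∧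
      mapOf r.mem (fOf u) (mOf u) = mapOf p.mem (fOf u) (mOf u) := by
  have he := hst.entry
  u_entry he
  simp only [vspec, Vorbis.conv_stackLo, Vorbis.conv_stackHi] at he_room he_top
  have hpre_u := hst.pre
  obtain ⟨hsh, hinv0, hargs⟩ := hst.pre
  have htop24 : (u.reg .rsp).toNat + 24 ≤ 0x800000 := hargs.args_top
  have hcr : (c.reg .rsp).toNat = (u.reg .rsp).toNat - 3008 := by
    rw [hcrsp]
    u_omega
  -- the footprint up to the call, then over it
  have hsame_c : Mem.SameExcept ((vorbis_decode_packet_rest.spec others frames len Ar stored room mode ysz).footprint u)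
      u.mem c.mem := by
    apply hst.same.step_same hpush
    intro w hw a h1 h2
    apply covered_footprint
    left
    unfold ownWins at hw
    simp only [List.mem_cons, List.mem_nil_iff, or_false] at hw
    rcases hw with rfl | rfl | rfl <;> simp only [] at h1 h2 <;> omega
  have hsame_r : Mem.SameExcept ((vorbis_decode_packet_rest.spec others frames len Ar stored room mode ysz).footprint u)
      u.mem r.mem := by
    apply hsame_c.step_same hsame
    intro w hw a h1 h2
    exact covered_footprint _ _ _ _ _ _ _ _ _ _ (callee_covered (framesIn frames u) hpre_u he_room hsame_c hcr hcrdi w hw a h1 h2)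
  -- the configuration values: both memories read as the entry memory
  have hmode : mode < 64 := ModeOK.mode_index_lt hinv0.fb.vorbis.mode hargs.mode_lt
  have cp := cfg_objEq (objEq_of_same hpre_u he_room hst.same) hmode
  have cr := cfg_objEq (objEq_of_same hpre_u he_room hsame_r) hmode
  rw [← hargs.m_eq] at cp cr
  obtain ⟨p1, p2, p3⟩ := cp
  obtain ⟨r1, r2, r3⟩ := cr
  have hpl := hargs.left_obj.1.above hsh.inv
  have hpl2 := hargs.left_obj.2
  have hleft : r.mem.i32 (pLeftOf u) = p.mem.i32 (pLeftOf u) := by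
    have k1 : (Block.mk (pLeftOf u) 4).Kept p.mem c.mem := by
      apply Block.Kept.of_sameExcept hpush
      · intro w hw
        unfold ownWins at hw
        simp only [List.mem_cons, List.mem_nil_iff, or_false] at hw
        rcases hw with rfl | rfl | rfl <;> simp only [] <;> omega
      · simp only []
        omega
    have k2 := callee_kept hpre hsame (Block.mk (pLeftOf u) 4) (by simp only []; omega) (by simp only []; omega)
      (by simp only []; omega)
    rw [k2.i32 _ (Nat.le_refl _) (Nat.le_refl _), k1.i32 _ (Nat.le_refl _) (Nat.le_refl _)]
  have hshadow : ShadowInv others (framesIn frames u) (spOf u).toNat r.mem := by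
    have := hpost.shadow
    rw [hrsp] at this
    exact this
  have hinv : DecodeInv others (framesIn frames u) len Ar stored room ysz r.mem (fOf u) := by
    have := hpost.inv
    rw [hcrdi] at this
    exact this
  refine ⟨⟨⟨hst.entry, hst.pre, hrsp, hcode, habi, hsame_r, ?_, ?_, ?_, ?_, ?_, ?_, ?_, hshadow, hinv⟩,
    ?_, ?_, ?_, ?_, ?_, ?_, ?_, ?_, ?_, ?_, ?_⟩, ?_⟩
  · rw [callee_read hpre hsame _ _ (by u_omega) (by u_omega) (by u_omega), own_read hpush _ _ (by u_omega) (by u_omega)]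
    exact hst.ra
  · rw [callee_read hpre hsame _ _ (by u_omega) (by u_omega) (by u_omega), own_read hpush _ _ (by u_omega) (by u_omega)]
    exact hst.s_r15
  · rw [callee_read hpre hsame _ _ (by u_omega) (by u_omega) (by u_omega), own_read hpush _ _ (by u_omega) (by u_omega)]
    exact hst.s_r14
  · rw [callee_read hpre hsame _ _ (by u_omega) (by u_omega) (by u_omega), own_read hpush _ _ (by u_omega) (by u_omega)]
    exact hst.s_r13
  · rw [callee_read hpre hsame _ _ (by u_omega) (by u_omega) (by u_omega), own_read hpush _ _ (by u_omega) (by u_omega)]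
    exact hst.s_r12
  · rw [callee_read hpre hsame _ _ (by u_omega) (by u_omega) (by u_omega), own_read hpush _ _ (by u_omega) (by u_omega)]
    exact hst.s_rbp
  · rw [callee_read hpre hsame _ _ (by u_omega) (by u_omega) (by u_omega), own_read hpush _ _ (by u_omega) (by u_omega)]
    exact hst.s_rbx
  · show r.mem.readLE (spOf u + 0x40) 8 = _
    rw [callee_read hpre hsame _ _ (by u_omega) (by u_omega) (by u_omega), own_read hpush _ _ (by u_omega) (by u_omega)]
    exact hst.slot_f
  · show r.mem.readLE (spOf u + 0x68) 8 = _
    rw [callee_read hpre hsame _ _ (by u_omega) (by u_omega) (by u_omega), own_read hpush _ _ (by u_omega) (by u_omega)]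
    exact hst.slot_len
  · show r.mem.readLE (spOf u + 0x70) 8 = _
    rw [callee_read hpre hsame _ _ (by u_omega) (by u_omega) (by u_omega), own_read hpush _ _ (by u_omega) (by u_omega)]
    exact hst.slot_m
  · show sint32 (r.mem.readLE (spOf u + 0x78) 4) = _
    rw [callee_read hpre hsame _ _ (by u_omega) (by u_omega) (by u_omega), own_read hpush _ _ (by u_omega) (by u_omega)]
    exact hst.slot_ls
  · show sint32 (r.mem.readLE (spOf u + 0x7c) 4) = _
    rw [callee_read hpre hsame _ _ (by u_omega) (by u_omega) (by u_omega), own_read hpush _ _ (by u_omega) (by u_omega)]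
    exact hst.slot_rs
  · show r.mem.readLE (spOf u + 0x50) 4 = _
    rw [callee_read hpre hsame _ _ (by u_omega) (by u_omega) (by u_omega), own_read hpush _ _ (by u_omega) (by u_omega),
      r1, ← p1]
    exact hst.slot_n
  · show r.mem.readLE (spOf u + 0x3c) 4 = _
    rw [callee_read hpre hsame _ _ (by u_omega) (by u_omega) (by u_omega), own_read hpush _ _ (by u_omega) (by u_omega),
      r1, ← p1]
    exact hst.slot_n2
  · show r.mem.readLE (spOf u + 0x60) 8 = _
    rw [callee_read hpre hsame _ _ (by u_omega) (by u_omega) (by u_omega), own_read hpush _ _ (by u_omega) (by u_omega)]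
    exact hst.slot_sb
  · rw [callee_read hpre hsame _ _ (by u_omega) (by u_omega) (by u_omega), own_read hpush _ _ (by u_omega) (by u_omega)]
    exact hst.arg_re
  · rw [callee_read hpre hsame _ _ (by u_omega) (by u_omega) (by u_omega), own_read hpush _ _ (by u_omega) (by u_omega)]
    exact hst.arg_left
  · rw [hleft]
    exact hst.left_val
  · rw [r2, ← p2]

/-- `movsxd` of a small zero-extended counter is the counter. -/
theorem sext_ofNat (i : Nat) (h : i < 2 ^ 31) :
    Word.ofBV (BitVec.signExtend 64 (Word.part .w32 (UInt64.ofNat i))) = UInt64.ofNat i := by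
  apply UInt64.toNat_inj.mp
  have e1 : (Word.part .w32 (UInt64.ofNat i)).toNat = i := by
    rw [Vorbis.toNat_part32, UInt64.toNat_ofNat']
    omega
  rw [toNat_sext32 _ (by omega), e1, UInt64.toNat_ofNat']
  omega

/-- Every allocated block, and the configuration values, over the segment's own stores (memory level). -/
theorem own_cfg {u₀ : State} {others : List Obj} {frames : List (Nat × FrameLayout)} {len : Nat} {Ar : Arena}
    {stored room : Int} {mode : Nat} {ysz : Nat → Nat} {u : State} {ret : Word} {ls : Int} {v : State} {m : Mem}
    (hst : Stable u₀ others frames len Ar stored room mode ysz u ret ls v)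
    (hs : Mem.SameExcept (ownWins (u.reg .rsp).toNat) v.mem m) :
    AllKept (RunBlk Ar len) v.mem m ∧
      nOf m (fOf u) (mOf u) = nOf v.mem (fOf u) (mOf u) ∧
      mapOf m (fOf u) (mOf u) = mapOf v.mem (fOf u) (mOf u) ∧
      nchan m (fOf u) = nchan v.mem (fOf u) := by
  have he := hst.entry
  u_entry he
  simp only [vspec, Vorbis.conv_stackLo, Vorbis.conv_stackHi] at he_room he_top
  obtain ⟨hsh, hinv0, hargs⟩ := hst.pre
  have hk : AllKept (RunBlk Ar len) v.mem m := by
    apply AllKept.of_sameExcept hst.inv.ok hs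
    intro B hB w hw
    have hoff := hst.inv.offStack B hB
    unfold ownWins at hw
    simp only [List.mem_cons, List.mem_nil_iff, or_false] at hw
    rcases hw with rfl | rfl | rfl <;> simp only [] <;> omega
  have hmode : mode < 64 := ModeOK.mode_index_lt hinv0.fb.vorbis.mode hargs.mode_lt
  have hcfg := cfg_kept (hk _ hst.inv.ob1) hmode
  rw [← hargs.m_eq] at hcfg
  exact ⟨hk, hcfg⟩

/-- The mode number is a mode of the CURRENT memory too (`mode_count` is configuration). -/
theorem mode_lt_cur {u₀ : State} {others : List Obj} {frames : List (Nat × FrameLayout)} {len : Nat} {Ar : Arena}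
    {stored room : Int} {mode : Nat} {ysz : Nat → Nat} {u : State} {ret : Word} {ls : Int} {v : State}
    (hst : Stable u₀ others frames len Ar stored room mode ysz u ret ls v) :
    (mode : Int) < stb_vorbis.mode_count v.mem (fOf u) := by
  have he := hst.entry
  u_entry he
  simp only [vspec, Vorbis.conv_stackLo, Vorbis.conv_stackHi] at he_room he_top
  have hoe := objEq_of_same hst.pre he_room hst.same
  have hm := hst.pre.2.2.mode_lt
  simp only [vacc, voff] at hm ⊢
  rw [hoe.i32 _ (by decide)]
  exact hm

/-- **The head of the submap loop, 0x11168d** (line 3331), ghost `i`: STABLE ∧ `r15 = map` ∧ `r12 = f` ∧ `[rsp + 8] = SB` ∧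
`ebp = i`. -/
structure Outer (u₀ : State) (others : List Obj) (frames : List (Nat × FrameLayout)) (len : Nat) (Ar : Arena)
    (stored room : Int) (mode : Nat) (ysz : Nat → Nat) (u : State) (ret : Word) (i : Nat) (v : State) : Prop
    extends Stable u₀ others frames len Ar stored room mode ysz u ret (lsOf u) v where
  rip : v.rip = Vorbis.L.vorbis_decode_packet_rest.loop8
  r15 : (v.reg .r15).toNat = mapOf v.mem (fOf u) (mOf u)
  r12 : (v.reg .r12).toNat = fOf u
  slot_sb8 : slot64 u v 0x8 = sbOf u
  rbp : v.reg .rbp = UInt64.ofNat i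
  i_le : i ≤ 256

/-- Segment .9, first block, 0x111559–0x111568 (line 3331: `i = 0`, spill SB, reload `f`): the entry assertion to the head of the
submap loop. -/
theorem entry_head {Lay : Layout} (hLay : Lay.hi = 0x1000000) {μ : Microarch} (hμ : UserX.MicroOK μ) {u₀ : State}
    (hcode : HasCodeNat Lay u₀ Vorbis.L.vorbis_decode_packet_rest.entry Vorbis.Code.code_vorbis_decode_packet_rest.nat Vorbis.L.vorbis_decode_packet_rest.size)
    (others : List Obj) (frames : List (Nat × FrameLayout)) (len : Nat) (Ar : Arena) (stored room : Int)
    (mode : Nat) (ysz : Nat → Nat) (u : State) (ret : Word) (v : State)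
    (hat : At9 u₀ others frames len Ar stored room mode ysz u ret v) :
    ReachVia Lay μ Vorbis.WayInv v (fun w => Outer u₀ others frames len Ar stored room mode ysz u ret 0 w) := by
  have he := hat.entry
  v_entry he
  have w_rip := hat.rip
  have hrsp : v.reg .rsp = u.reg .rsp - 3000 := hat.rsp
  have w_eq : Mem.EqOn Vorbis.L.textLo Vorbis.L.textHi u₀.mem v.mem := hat.code
  have hdf : v.flags .df = false := (show abiInv _ from hat.abi).1
  have hmx : v.mxcsr &&& 0x1F80 = 0x1F80 := (show abiInv _ from hat.abi).2
  have hsse := Vorbis.sseOK_of_abiInv hat.abi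
  have hslotf : v.mem.readLE (u.reg .rsp - 2936) 8 = fOf u := by
    have := hat.slot_f
    have e : spOf u + 0x40 = u.reg .rsp - 2936 := by u_omega
    rw [← e]
    exact this
  u_walk hcode [hμ.vendor] until [Vorbis.L.vorbis_decode_packet_rest.loop8] span [Vorbis.L.textLo, Vorbis.L.textHi] side (v_side)
  have hs : Mem.SameExcept (ownWins (u.reg .rsp).toNat) v.mem s_111568.mem := by
    unfold ownWins
    u_same
  have habi : abiInv s_111568 := by v_inv
  have hrsp' : s_111568.reg .rsp = spOf u := by
    rw [w_kept .rsp rfl]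
    exact hrsp
  obtain ⟨hst, hk, cmap, cch⟩ := stable_own hat.toStable hs hrsp' w_eq habi
  have h15 : (s_111568.reg .r15).toNat = mapOf s_111568.mem (fOf u) (mOf u) := by
    rw [w_kept .r15 rfl, cmap]
    exact hat.r15
  have h12 : (s_111568.reg .r12).toNat = fOf u := by
    rw [w_r12]
  have hsb : slot64 u s_111568 0x8 = sbOf u := by
    show s_111568.mem.readLE (spOf u + 0x8) 8 = _
    have e : spOf u + 0x8 = u.reg .rsp - 2992 := by u_omega
    rw [e, w_mem, Mem.readLE_writeLE_same _ _ _ _ (by decide)]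
    have h13 := hat.r13
    have hlt := (v.reg .r13).toNat_lt
    rw [Nat.mod_eq_of_lt (by omega)]
    exact h13
  exact ReachVia.done ⟨hst, w_rip, h15, h12, hsb, w_rbp, by omega⟩

/-- **Inside the submap loop** (the head of the channel loop 0x1115cb, line 3336, and the point 0x111658 after it), ghosts `i`
(submap), `j` (channel), `ch` (channels collected): STABLE ∧ `r15 = map` ∧ `r12 = f` ∧ `[rsp + 8] = SB` ∧ `ebp = i < submaps` ∧
`ebx = j ≤ C` ∧ `r13d = ch ≤ j` ∧ RB(ch). -/
structure Inner (u₀ : State) (others : List Obj) (frames : List (Nat × FrameLayout)) (len : Nat) (Ar : Arena)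
    (stored room : Int) (mode : Nat) (ysz : Nat → Nat) (u : State) (ret : Word) (pc : Word) (i j ch : Nat) (v : State) : Prop
    extends Stable u₀ others frames len Ar stored room mode ysz u ret (lsOf u) v where
  rip : v.rip = pc
  r15 : (v.reg .r15).toNat = mapOf v.mem (fOf u) (mOf u)
  r12 : (v.reg .r12).toNat = fOf u
  slot_sb8 : slot64 u v 0x8 = sbOf u
  rbp : v.reg .rbp = UInt64.ofNat i
  i_lt : i < Mapping.submaps v.mem (mapOf v.mem (fOf u) (mOf u))
  rbx : v.reg .rbx = UInt64.ofNat j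
  r13 : v.reg .r13 = UInt64.ofNat ch
  ch_le : ch ≤ j
  j_le : j ≤ nchan v.mem (fOf u)
  rb : ∀ k, k < ch →
    (v.mem.u8 (step2FlagAt u + k) = 0 ∧ ∃ c : Nat, (c : Int) < stb_vorbis.channels v.mem (fOf u) ∧
        v.mem.ptr (residueBuffersAt u + 8 * k) = stb_vorbis.channel_buffers v.mem (fOf u) c) ∨
    (v.mem.u8 (step2FlagAt u + k) = 1 ∧ v.mem.ptr (residueBuffersAt u + 8 * k) = 0)

/-- HD3 for the block size of a mode: `64 ≤ n ≤ blocksize_1 ≤ 8192`. -/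
theorem nOf_range {mem : Mem} {f : Nat} (h : HD3 mem f) (m : Nat) :
    64 ≤ nOf mem f m ∧ nOf mem f m ≤ bsize mem f 1 ∧ bsize mem f 1 ≤ 8192 := by
  obtain ⟨h1, h2, h3⟩ := h.range
  unfold nOf bsize
  simp only [Nat.one_ne_zero, if_false]
  split <;> omega


section s9

variable {u₀ : State} {others : List Obj} {frames : List (Nat × FrameLayout)} {len : Nat} {Ar : Arena}
  {stored room : Int} {mode : Nat} {ysz : Nat → Nat} {e : State} {ret : Word} {v : State}

/-- The mode number is a mode of the CURRENT memory (`Frame` form of `mode_lt_cur`). -/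
theorem s9_mode_lt_now (h : Frame u₀ others frames len Ar stored room mode ysz e ret v)
    (hroom : 0x700000 + 3856 ≤ (e.reg .rsp).toNat) :
    (mode : Int) < stb_vorbis.mode_count v.mem (fOf e) := by
  have hpre := h.pre
  obtain ⟨hsh, hinv, hargs⟩ := hpre
  have hd : DecodeSame (fOf e) e.mem v.mem :=
    StoreOK.decodeSame hinv.ok hinv.ob1 hinv.sep h.same (fun s hs => footprint_storeOK h.pre hroom s hs)
  have e1 := hd.i32 480 (by decide)
  have hm := hargs.mode_lt
  simp only [vacc, voff] at hm ⊢
  rw [e1]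
  exact hm

/-- MP2 – MP6 of the mapping record `map = &f->mapping[m->mapping]` in the current memory. -/
theorem s9_map_ok (h : Frame u₀ others frames len Ar stored room mode ysz e ret v)
    (hroom : 0x700000 + 3856 ≤ (e.reg .rsp).toNat) :
    MappingAtOK (RunBlk Ar len) v.mem (fOf e) (mapOf v.mem (fOf e) (mOf e)) := by
  have hv := h.inv.fb.vorbis
  have hm := s9_mode_lt_now h hroom
  have hargs := h.pre.2.2
  unfold mapOf
  rw [hargs.m_eq]
  exact hv.mapping.of_mode hv.mode hm

/-- Where the mapping record is: its 56 bytes lie in the data space and off the stack region. -/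
theorem s9_map_where (h : Frame u₀ others frames len Ar stored room mode ysz e ret v)
    (hroom : 0x700000 + 3856 ≤ (e.reg .rsp).toNat) :
    0x100000 ≤ mapOf v.mem (fOf e) (mOf e) ∧ mapOf v.mem (fOf e) (mOf e) + 56 ≤ 0xC00000 ∧
      (mapOf v.mem (fOf e) (mOf e) + 56 ≤ 0x700000 ∨ 0x800000 ≤ mapOf v.mem (fOf e) (mOf e)) := by
  have hv := h.inv.fb.vorbis
  have hm := s9_mode_lt_now h hroom
  have hargs := h.pre.2.2
  have hlt := hv.mode.mapping_lt hm
  have hblk := hv.mapping.MP1_block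
  have hin := h.inv.ok.inside _ hblk
  have hoff := h.inv.offStack _ hblk
  have hmp1 := hv.mapping.MP1
  unfold mapOf
  rw [hargs.m_eq]
  simp only [vacc, voff] at hlt hblk hin hoff hmp1 ⊢
  omega

/-- Where the `chan` block of the mapping record is (MP2: `3·C` bytes): in the data space, off the stack region. -/
theorem s9_chan_where (h : Frame u₀ others frames len Ar stored room mode ysz e ret v)
    (hroom : 0x700000 + 3856 ≤ (e.reg .rsp).toNat) :
    0x100000 ≤ Mapping.chan v.mem (mapOf v.mem (fOf e) (mOf e)) ∧
      Mapping.chan v.mem (mapOf v.mem (fOf e) (mOf e)) + 3 * nchan v.mem (fOf e) ≤ 0xC00000 ∧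
      (Mapping.chan v.mem (mapOf v.mem (fOf e) (mOf e)) + 3 * nchan v.mem (fOf e) ≤ 0x700000 ∨
        0x800000 ≤ Mapping.chan v.mem (mapOf v.mem (fOf e) (mOf e))) := by
  have hblk := (s9_map_ok h hroom).MP2
  have hin := h.inv.ok.inside _ hblk
  have hoff := h.inv.offStack _ hblk
  simp only [voff] at hblk hin hoff
  omega

/-- A check site in the mapping record: MP1. -/
theorem s9_site_map (h : Frame u₀ others frames len Ar stored room mode ysz e ret v)
    (hroom : 0x700000 + 3856 ≤ (e.reg .rsp).toNat) (off n : Nat) (hoff : off + n ≤ 56) (hn : 1 ≤ n) :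
    Site (LiveSet others (framesIn frames e)) (mapOf v.mem (fOf e) (mOf e) + off) n := by
  have hv := h.inv.fb.vorbis
  have hm := s9_mode_lt_now h hroom
  have hargs := h.pre.2.2
  refine hv.mapping.site_record h.inv.live (hv.mode.mapping_lt hm) off n (by simp only [voff]; omega) hn ?_
  unfold mapOf
  rw [hargs.m_eq]

/-- A check in the mapping record. -/
theorem s9_chk_map (h : Frame u₀ others frames len Ar stored room mode ysz e ret v)
    (hroom : 0x700000 + 3856 ≤ (e.reg .rsp).toNat) {m' : Mem} (hun : ShadowUntouched v.mem m') (b : Word) (off n : Nat)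
    (hoff : off + n ≤ 56) (hn : 1 ≤ n) (hb : b.toNat = mapOf v.mem (fOf e) (mOf e) + off) : AccSmall n m' b :=
  check_site h.shadow hun (s9_site_map h hroom off n hoff hn) hb

/-- `movzx r32, BYTE PTR [m]`: the loaded byte, below 256 whatever was read. -/
theorem s9_zx8 (x : Nat) : Word.ofBV (BitVec.zeroExtend 32 (BitVec.ofNat 8 x)) = UInt64.ofNat (x % 256) := by
  apply UInt64.toNat_inj.mp
  rw [Vorbis.toNat_ofBV32, UInt64.toNat_ofNat']
  simp only [BitVec.zeroExtend, BitVec.toNat_setWidth, BitVec.toNat_ofNat]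
  omega


/-- **The loop's standing facts over the segment's own stores**: `Stable`, `r15 = map`, `r12 = f`, `[rsp + 8] = SB` for a state `s`
whose memory differs from `v`'s inside `ownWins` only, whose r15 / r12 are `v`'s and whose slot `[rsp + 8]` reads as in `v`; the
configuration values (`map`, `submaps`, the channel count) read the same. -/
theorem s9_carry {ls : Int} {s : State}
    (hst : Stable u₀ others frames len Ar stored room mode ysz e ret ls v)
    (h15 : (v.reg .r15).toNat = mapOf v.mem (fOf e) (mOf e)) (h12 : (v.reg .r12).toNat = fOf e)
    (hsb : slot64 e v 0x8 = sbOf e)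
    (hs : Mem.SameExcept (ownWins (e.reg .rsp).toNat) v.mem s.mem)
    (hrsp : s.reg .rsp = spOf e) (hcode : Vorbis.CodeOK u₀ s.mem) (habi : abiInv s)
    (k15 : s.reg .r15 = v.reg .r15) (k12 : s.reg .r12 = v.reg .r12)
    (ksb : ∀ x, v.mem.readLE (e.reg .rsp - 2992) 8 = x → s.mem.readLE (e.reg .rsp - 2992) 8 = x) :
    Stable u₀ others frames len Ar stored room mode ysz e ret ls s ∧
      (s.reg .r15).toNat = mapOf s.mem (fOf e) (mOf e) ∧
      (s.reg .r12).toNat = fOf e ∧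
      slot64 e s 0x8 = sbOf e ∧
      mapOf s.mem (fOf e) (mOf e) = mapOf v.mem (fOf e) (mOf e) ∧
      Mapping.submaps s.mem (mapOf v.mem (fOf e) (mOf e)) = Mapping.submaps v.mem (mapOf v.mem (fOf e) (mOf e)) ∧
      nchan s.mem (fOf e) = nchan v.mem (fOf e) ∧
      AllKept (RunBlk Ar len) v.mem s.mem := by
  have he := hst.entry
  u_entry he
  simp only [vspec, Vorbis.conv_stackLo, Vorbis.conv_stackHi] at he_room he_top
  obtain ⟨hst', hk, cmap, cch⟩ := stable_own hst hs hrsp hcode habi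
  obtain ⟨hmw1, hmw2, hmw3⟩ := s9_map_where hst.toFrame he_room
  refine ⟨hst', ?_, ?_, ?_, cmap, ?_, cch, hk⟩
  · rw [k15, cmap]
    exact h15
  · rw [k12]
    exact h12
  · show s.mem.readLE (spOf e + 0x8) 8 = _
    have e8 : spOf e + 0x8 = e.reg .rsp - 2992 := by u_omega
    rw [e8]
    apply ksb
    rw [← e8]
    exact hsb
  · simp only [vacc, voff]
    show s.mem.readLE (addr (mapOf v.mem (fOf e) (mOf e) + 16)) 1 = v.mem.readLE (addr (mapOf v.mem (fOf e) (mOf e) + 16)) 1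
    have ea : (addr (mapOf v.mem (fOf e) (mOf e) + 16)).toNat = mapOf v.mem (fOf e) (mOf e) + 16 := by
      unfold addr
      rw [UInt64.toNat_ofNat']
      omega
    exact own_read hs _ _ (by omega) (by omega)

/-- `cmp eax, ebp ; jle` with `eax` a zero-extended byte and `ebp` a small counter. -/
theorem s9_br_le (x i : Nat) (hi : i < 2 ^ 31) :
    ((Word.part .w32 (UInt64.ofNat (x % 256))).toInt ≤ (Word.part .w32 (UInt64.ofNat i)).toInt) ↔ x % 256 ≤ i := by
  rw [cnt32_part_toInt _ (by omega), cnt32_part_toInt _ hi]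
  omega

/-- The head of the submap loop, 0x11168d – 0x1116aa (line 3331). -/
theorem outer_head {Lay : Layout} (hLay : Lay.hi = 0x1000000) {μ : Microarch} (hμ : UserX.MicroOK μ)
    (hcode : HasCodeNat Lay u₀ Vorbis.L.vorbis_decode_packet_rest.entry Vorbis.Code.code_vorbis_decode_packet_rest.nat Vorbis.L.vorbis_decode_packet_rest.size)
    (h_load1 : Asan.SmallCheck Lay μ Vorbis.WayInv (Vorbis.CodeOK u₀) [.rax, .rdx] 1 Vorbis.L.__asan_load1_noabort.entry)
    (i : Nat) (v : State)
    (hat : Outer u₀ others frames len Ar stored room mode ysz e ret i v) :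
    ReachVia Lay μ Vorbis.WayInv v (fun w => At10 u₀ others frames len Ar stored room mode ysz e ret w ∨
      Inner u₀ others frames len Ar stored room mode ysz e ret Vorbis.L.vorbis_decode_packet_rest.loop7 i 0 0 w) := by
  have he := hat.entry
  v_entry he
  have w_rip := hat.rip
  have hrsp : v.reg .rsp = e.reg .rsp - 3000 := hat.rsp
  have w_eq : Mem.EqOn Vorbis.L.textLo Vorbis.L.textHi u₀.mem v.mem := hat.code
  have hdf : v.flags .df = false := (show abiInv _ from hat.abi).1
  have hmx : v.mxcsr &&& 0x1F80 = 0x1F80 := (show abiInv _ from hat.abi).2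
  have hsse := Vorbis.sseOK_of_abiInv hat.abi
  have hf := hat.toStable.toFrame
  have hrbp := hat.rbp
  obtain ⟨map, hmapdef⟩ : ∃ map, mapOf v.mem (fOf e) (mOf e) = map := ⟨_, rfl⟩
  have hr15n : (v.reg .r15).toNat = map := by
    rw [← hmapdef]
    exact hat.r15
  have hr15 : v.reg .r15 = addr map := eq_addr _ _ hr15n
  obtain ⟨hmw1, hmw2, hmw3⟩ := s9_map_where hf he_room
  rw [hmapdef] at hmw1 hmw2 hmw3
  have hmp3 := (s9_map_ok hf he_room).MP3
  rw [hmapdef] at hmp3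
  obtain ⟨sm, hsmdef⟩ : ∃ sm, Mapping.submaps v.mem map = sm := ⟨_, rfl⟩
  rw [hsmdef] at hmp3
  have rsm : v.mem.readLE (addr map + 16) 1 = sm := by
    simp only [vacc, voff] at hsmdef
    simp only [vfield]
    exact hsmdef
  u_walk hcode [hμ.vendor, s9_zx8] until [Vorbis.L.vorbis_decode_packet_rest.loop7, Vorbis.L.vorbis_decode_packet_rest.cut29] span [Vorbis.L.textLo, Vorbis.L.textHi] side (v_side)
  case check_111691 =>
    have hun : ShadowUntouched v.mem s_111691.mem := by v_untouched
    exact s9_chk_map hf he_room hun _ 16 1 (by omega) (by omega) (by rw [hmapdef]; u_omega)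
  · -- 0x11169d taken: `i ≥ submaps`, the exit to segment .10 (0x1116af)
    have hs : Mem.SameExcept (ownWins (e.reg .rsp).toNat) v.mem s_11169d.mem := by
      unfold ownWins
      u_same
    have habi : abiInv s_11169d := by v_inv
    have ksb : ∀ x, v.mem.readLE (e.reg .rsp - 2992) 8 = x → s_11169d.mem.readLE (e.reg .rsp - 2992) 8 = x := by
      intro x hx
      rw [w_mem]
      u_read
    obtain ⟨hst', c15, c12, csb, -, -, -, -⟩ := s9_carry hat.toStable hat.r15 hat.r12 hat.slot_sb8 hs w_rsp w_eq habi
      (w_kept .r15 rfl) (w_kept .r12 rfl) ksb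
    exact ReachVia.done (Or.inl ⟨hst', w_rip, c15, c12, csb⟩)
  · -- 0x11169d not taken: `i < submaps`; `ch = 0`, `j = 0`, to the head of the channel loop (0x1115cb)
    have hs : Mem.SameExcept (ownWins (e.reg .rsp).toNat) v.mem s_1116aa.mem := by
      unfold ownWins
      u_same
    have habi : abiInv s_1116aa := by v_inv
    have ksb : ∀ x, v.mem.readLE (e.reg .rsp - 2992) 8 = x → s_1116aa.mem.readLE (e.reg .rsp - 2992) 8 = x := by
      intro x hx
      rw [w_mem]
      u_read
    obtain ⟨hst', c15, c12, csb, cmap, csm, cch, -⟩ := s9_carry hat.toStable hat.r15 hat.r12 hat.slot_sb8 hs w_rsp w_eq habi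
      (w_kept .r15 rfl) (w_kept .r12 rfl) ksb
    have hile := hat.i_le
    have hlt : i < sm := by
      have := mt (s9_br_le sm i (by omega)).mpr hbr_11169d
      omega
    refine ReachVia.done (Or.inr ⟨hst', w_rip, c15, c12, csb, ?_, ?_, w_rbx, w_r13, Nat.le_refl _, Nat.zero_le _, ?_⟩)
    · rw [w_kept .rbp rfl]
      exact hrbp
    · rw [hmapdef] at csm
      rw [cmap, hmapdef, csm, hsmdef]
      exact hlt
    · intro k hk
      exact absurd hk (Nat.not_lt_zero k)


/-- `f->channels` as the walker loads it: the dword at `f + 4` is the channel count (HD1). -/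
theorem s9_chan_read {mem : Mem} {f : Nat} (h1 : 1 ≤ stb_vorbis.channels mem f) (h2 : stb_vorbis.channels mem f ≤ 16) :
    mem.readLE (addr f + 4) 4 = nchan mem f ∧ nchan mem f ≤ 16 ∧ 1 ≤ nchan mem f := by
  rw [nchan_def]
  simp only [vacc, voff] at h1 h2 ⊢
  have hc := mem.i32_cases (f + 4)
  have e : mem.readLE (addr f + 4) 4 = mem.u32 (f + 4) := by
    simp only [vfield]
  rw [e]
  omega


/-- A check of a field of `*f`. -/
theorem s9_chk_f (h : Frame u₀ others frames len Ar stored room mode ysz e ret v)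
    {m' : Mem} (hun : ShadowUntouched v.mem m') (b : Word) (off n : Nat)
    (hoff : off + n ≤ 1808) (hn : 1 ≤ n) (hb : b.toNat = (e.reg .rdi).toNat + off) : AccSmall n m' b :=
  check_site h.shadow hun (h.inv.fb.vorbis.bits.site_field h.inv.live off n hoff hn rfl) hb

/-- A check inside one of the four objects of the function's own protected frame. -/
theorem s9_chk_obj (h : Frame u₀ others frames len Ar stored room mode ysz e ret v)
    {m' : Mem} (hun : ShadowUntouched v.mem m') (off size : Nat)
    (ho : (off = 32 ∧ size = 128) ∨ (off = 192 ∧ size = 256) ∨ (off = 512 ∧ size = 1024) ∨ (off = 1664 ∧ size = 1024))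
    (b : Word) (n : Nat) (hn : 1 ≤ n) (h1 : (e.reg .rsp).toNat - 2872 + off ≤ b.toNat)
    (h2 : b.toNat + n ≤ (e.reg .rsp).toNat - 2872 + off + size) : AccSmall n m' b :=
  check_small h.shadow hun (frame_obj_mem others frames e off size ho) hn h1 h2

/-- A 1-byte check in `map->chan[j]`, `j < C`: MP2. -/
theorem s9_chk_chan (h : Frame u₀ others frames len Ar stored room mode ysz e ret v)
    (hroom : 0x700000 + 3856 ≤ (e.reg .rsp).toNat) {m' : Mem} (hun : ShadowUntouched v.mem m') (b : Word) {j : Nat}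
    (hj : j < nchan v.mem (fOf e)) (off : Nat) (hoff : off + 1 ≤ 3)
    (hb : b.toNat = Mapping.chan v.mem (mapOf v.mem (fOf e) (mOf e)) + 3 * j + off) : AccSmall 1 m' b := by
  have hj' : (j : Int) < stb_vorbis.channels v.mem (fOf e) := by
    rw [nchan_def] at hj
    omega
  refine check_site h.shadow hun ((s9_map_ok h hroom).site_chan h.inv.live hj' off 1 (by simp only [voff]; omega)
    (Nat.le_refl _) ?_) hb
  simp only [vacc, voff]

/-- **RB(k)** (BRIEF, segment .9): entry `k` of `do_not_decode` / `residue_buffers` in the memory `m` is "decode into one of the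
decoder's channel buffers" or "do not decode, NULL"; the channel buffers are those of the memory `cm`. -/
def s9_RB (e : State) (cm m : Mem) (k : Nat) : Prop :=
  (m.u8 (step2FlagAt e + k) = 0 ∧ ∃ c : Nat, (c : Int) < stb_vorbis.channels cm (fOf e) ∧
      m.ptr (residueBuffersAt e + 8 * k) = stb_vorbis.channel_buffers cm (fOf e) c) ∨
  (m.u8 (step2FlagAt e + k) = 1 ∧ m.ptr (residueBuffersAt e + 8 * k) = 0)

/-- RB(k) in a memory whose entry `k` reads as before. -/
theorem s9_RB_keep {cm m m' : Mem} {k : Nat} (h : s9_RB e cm m k)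
    (h1 : ∀ x, m.readLE (addr ((e.reg .rsp).toNat - 3000 + 320 + k)) 1 = x →
      m'.readLE (addr ((e.reg .rsp).toNat - 3000 + 320 + k)) 1 = x)
    (h8 : ∀ x, m.readLE (addr ((e.reg .rsp).toNat - 3000 + 160 + 8 * k)) 8 = x →
      m'.readLE (addr ((e.reg .rsp).toNat - 3000 + 160 + 8 * k)) 8 = x) :
    s9_RB e cm m' k := by
  unfold s9_RB step2FlagAt residueBuffersAt at h ⊢
  simp only [vacc] at h ⊢
  unfold Mem.u8 Mem.u64 at h ⊢
  rw [h1 _ rfl, h8 _ rfl]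
  exact h

/-- **The assertion of the channel loop from its standing facts**: `Inner` for a state `s` whose memory differs from that of a
state `v` with `Inner` inside `ownWins` only, with the new counters and RB for them. -/
theorem s9_inner_of {pc : Word} {i j ch : Nat} {s : State}
    (hat : Inner u₀ others frames len Ar stored room mode ysz e ret pc i j ch v)
    (hs : Mem.SameExcept (ownWins (e.reg .rsp).toNat) v.mem s.mem)
    (hrsp : s.reg .rsp = spOf e) (hcode : Vorbis.CodeOK u₀ s.mem) (habi : abiInv s)
    (k15 : s.reg .r15 = v.reg .r15) (k12 : s.reg .r12 = v.reg .r12) (kbp : s.reg .rbp = v.reg .rbp)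
    (ksb : ∀ x, v.mem.readLE (e.reg .rsp - 2992) 8 = x → s.mem.readLE (e.reg .rsp - 2992) 8 = x)
    (pc' : Word) (j' ch' : Nat) (hrip : s.rip = pc')
    (hrbx : s.reg .rbx = UInt64.ofNat j') (hr13 : s.reg .r13 = UInt64.ofNat ch') (hch : ch' ≤ j')
    (hj : j' ≤ nchan v.mem (fOf e))
    (hrb : ∀ k, k < ch' → s9_RB e v.mem s.mem k) :
    Inner u₀ others frames len Ar stored room mode ysz e ret pc' i j' ch' s := by
  have he := hat.entry
  u_entry he
  simp only [vspec, Vorbis.conv_stackLo, Vorbis.conv_stackHi] at he_room he_top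
  obtain ⟨hst', c15, c12, csb, cmap, csm, cch, hk⟩ := s9_carry hat.toStable hat.r15 hat.r12 hat.slot_sb8 hs hrsp hcode habi
    k15 k12 ksb
  have hob := hk _ hat.inv.ob1
  have ech : stb_vorbis.channels s.mem (fOf e) = stb_vorbis.channels v.mem (fOf e) := by
    simp only [vacc, voff]
    exact hob.i32 _ (by simp only [vblock, voff]; omega) (by simp only [vblock, voff]; omega)
  have hC16 := hat.inv.config.header.HD1.2
  have ebuf : ∀ c : Nat, (c : Int) < stb_vorbis.channels v.mem (fOf e) →
      stb_vorbis.channel_buffers s.mem (fOf e) c = stb_vorbis.channel_buffers v.mem (fOf e) c := by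
    intro c hc
    simp only [vacc, voff]
    exact hob.u64 _ (by simp only [vblock, voff]; omega) (by simp only [vblock, voff]; omega)
  refine ⟨hst', hrip, c15, c12, csb, ?_, ?_, hrbx, hr13, hch, ?_, ?_⟩
  · rw [kbp]
    exact hat.rbp
  · rw [cmap, csm]
    exact hat.i_lt
  · rw [cch]
    exact hj
  · intro k hk
    rcases hrb k hk with ⟨h0, c, hc, hp⟩ | ⟨h1, hp⟩
    · refine Or.inl ⟨h0, c, ?_, ?_⟩
      · rw [ech]
        exact hc
      · rw [ebuf c hc]
        exact hp
    · exact Or.inr ⟨h1, hp⟩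


/-- A qword read back from a register that holds it. -/
theorem s9_ofNat_readLE8 (m : Mem) (a : Word) : (UInt64.ofNat (m.readLE a 8)).toNat % 256 ^ 8 = m.readLE a 8 := by
  have h := Mem.readLE_lt' m a 8
  rw [UInt64.toNat_ofNat']
  omega

/-- `cmp [f + 4], ebx ; jle` not taken: the counter is below the channel count. -/
theorem s9_lt_of_br (C j : Nat) (hC : C ≤ 16) (hj : j ≤ 16)
    (h : ¬ (BitVec.ofNat 32 C).toInt ≤ (BitVec.ofNat 32 j).toInt) : j < C := by
  rw [cnt32_toInt C (by omega), cnt32_toInt j (by omega)] at h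
  omega

/-- One round of the channel loop, 0x1115cb – 0x1115c8 (lines 3336–3345). -/
theorem inner_body {Lay : Layout} (hLay : Lay.hi = 0x1000000) {μ : Microarch} (hμ : UserX.MicroOK μ)
    (hcode : HasCodeNat Lay u₀ Vorbis.L.vorbis_decode_packet_rest.entry Vorbis.Code.code_vorbis_decode_packet_rest.nat Vorbis.L.vorbis_decode_packet_rest.size)
    (h_store1 : Asan.SmallCheck Lay μ Vorbis.WayInv (Vorbis.CodeOK u₀) [.rax, .rdx] 1 Vorbis.L.__asan_store1_noabort.entry)
    (h_load8 : Asan.SmallCheck Lay μ Vorbis.WayInv (Vorbis.CodeOK u₀) [.rax, .rcx, .rdx] 8 Vorbis.L.__asan_load8_noabort.entry)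
    (h_store8 : Asan.SmallCheck Lay μ Vorbis.WayInv (Vorbis.CodeOK u₀) [.rax, .rcx, .rdx] 8 Vorbis.L.__asan_store8_noabort.entry)
    (h_load4 : Asan.SmallCheck Lay μ Vorbis.WayInv (Vorbis.CodeOK u₀) [.rax, .rcx, .rdx] 4 Vorbis.L.__asan_load4_noabort.entry)
    (h_load1 : Asan.SmallCheck Lay μ Vorbis.WayInv (Vorbis.CodeOK u₀) [.rax, .rdx] 1 Vorbis.L.__asan_load1_noabort.entry)
    (i j ch : Nat) (v : State)
    (hat : Inner u₀ others frames len Ar stored room mode ysz e ret Vorbis.L.vorbis_decode_packet_rest.loop7 i j ch v) :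
    ReachVia Lay μ Vorbis.WayInv v (fun w =>
      Inner u₀ others frames len Ar stored room mode ysz e ret 0x111658 i j ch w ∨
      Inner u₀ others frames len Ar stored room mode ysz e ret Vorbis.L.vorbis_decode_packet_rest.loop7 i (j + 1) ch w ∨
      Inner u₀ others frames len Ar stored room mode ysz e ret Vorbis.L.vorbis_decode_packet_rest.loop7 i (j + 1) (ch + 1) w) := by
  have he := hat.entry
  v_entry he
  have w_rip := hat.rip
  have hrsp : v.reg .rsp = e.reg .rsp - 3000 := hat.rsp
  have w_eq : Mem.EqOn Vorbis.L.textLo Vorbis.L.textHi u₀.mem v.mem := hat.code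
  have hdf : v.flags .df = false := (show abiInv _ from hat.abi).1
  have hmx : v.mxcsr &&& 0x1F80 = 0x1F80 := (show abiInv _ from hat.abi).2
  have hsse := Vorbis.sseOK_of_abiInv hat.abi
  have hf := hat.toStable.toFrame
  have hrbp := hat.rbp
  have hrbx := hat.rbx
  have hr13 := hat.r13
  -- `*f`
  have hfoff : (e.reg .rdi).toNat + 1808 ≤ 0x700000 ∨ 0x800020 ≤ (e.reg .rdi).toNat := (SpanOK.geom_obj hat.inv he_top).1
  have hfoff2 : (e.reg .rdi).toNat + 1808 ≤ 0xC00000 := (SpanOK.geom_obj hat.inv he_top).2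
  have hr12 : v.reg .r12 = addr (e.reg .rdi).toNat := eq_addr _ _ hat.r12
  obtain ⟨rC, hC16, hC1⟩ := s9_chan_read hat.inv.config.header.HD1.1 hat.inv.config.header.HD1.2
  obtain ⟨C, hCdef⟩ : ∃ C, nchan v.mem (fOf e) = C := ⟨_, rfl⟩
  rw [hCdef] at rC hC16 hC1
  replace rC : v.mem.readLE (addr (e.reg .rdi).toNat + 4) 4 = C := rC
  have hjle : j ≤ C := by
    rw [← hCdef]
    exact hat.j_le
  have hchle := hat.ch_le
  -- the mapping record
  obtain ⟨map, hmapdef⟩ : ∃ map, mapOf v.mem (fOf e) (mOf e) = map := ⟨_, rfl⟩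
  have hr15n : (v.reg .r15).toNat = map := by
    rw [← hmapdef]
    exact hat.r15
  have hr15 : v.reg .r15 = addr map := eq_addr _ _ hr15n
  obtain ⟨hmw1, hmw2, hmw3⟩ := s9_map_where hf he_room
  rw [hmapdef] at hmw1 hmw2 hmw3
  obtain ⟨chan, hchdef⟩ : ∃ chan, Mapping.chan v.mem map = chan := ⟨_, rfl⟩
  obtain ⟨hcw1, hcw2, hcw3⟩ := s9_chan_where hf he_room
  rw [hmapdef, hchdef] at hcw1 hcw2 hcw3
  rw [hCdef] at hcw2 hcw3
  have rch0 : v.mem.readLE (addr map + 8) 8 = chan := by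
    simp only [vacc, voff] at hchdef
    simp only [vfield]
    exact hchdef
  have haf : (addr (e.reg .rdi).toNat).toNat = (e.reg .rdi).toNat := toNat_addr _ (by omega)
  have ham : (addr map).toNat = map := toNat_addr _ (by omega)
  have rC' : ∀ x, (v.mem.writeLE (e.reg .rsp - 3008) 8 x).readLE (addr (e.reg .rdi).toNat + 4) 4 = C := by
    intro x
    clear hmw3 hcw3
    u_read
  have hltC : ¬ (BitVec.ofNat 32 C).toInt ≤ (BitVec.ofNat 32 j).toInt → j < C := s9_lt_of_br C j hC16 (by omega)
  have hcb : v.mem.readLE (addr (e.reg .rdi).toNat + (UInt64.ofNat j + 108) * 8 + 8) 8 =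
      stb_vorbis.channel_buffers v.mem (fOf e) j := by
    have ea : addr (e.reg .rdi).toNat + (UInt64.ofNat j + 108) * 8 + 8 = addr ((e.reg .rdi).toNat + 872 + 8 * j) := by
      apply eq_addr
      clear hmw3 hcw3 hfoff
      u_omega
    rw [ea]
    simp only [vacc, voff]
    rfl
  u_walk hcode [hμ.vendor, s9_zx8, cnt32_part j, cnt32_part ch, cnt32_part i, cnt32_sext_bv j (by omega), cnt32_sext_bv ch (by omega)] until [Vorbis.L.vorbis_decode_packet_rest.loop7, 0x111658] span [Vorbis.L.textLo, Vorbis.L.textHi] side (v_side)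
  · -- check_1115d0: `f->channels`
    have hun : ShadowUntouched v.mem s_1115d0.mem := by v_untouched
    exact s9_chk_f hf hun _ 4 4 (by omega) (by omega) (by clear hmw3 hcw3 hfoff; u_omega)
  · -- check_1115e0: `map->chan`
    have hun : ShadowUntouched v.mem s_1115e0.mem := by v_untouched
    exact s9_chk_map hf he_room hun _ 8 8 (by omega) (by omega) (by rw [hmapdef]; clear hmw3 hcw3 hfoff; u_omega)
  · -- check_1115f4: `map->chan[j].mux`
    have hjlt := hltC hbr_1115da
    have hun : ShadowUntouched v.mem s_1115f4.mem := by v_untouched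
    refine s9_chk_chan hf he_room hun _ (j := j) (by rw [hCdef]; exact hjlt) 2 (by omega) ?_
    rw [hmapdef, hchdef]
    clear hmw3 hcw3 hfoff
    u_omega
  · -- side_code: the return address of the next check call is stored off the text
    try clear w_rax
    try clear w_rcx
    try clear w_r14
    try clear w_rdi
    try clear hbr_111600
    try clear w_acc_1115f4
    try clear hbr_11161b
    clear hmw3 hcw3 hfoff
    u_omega
  · -- check_11160d: `zero_channel[j]`
    try clear w_rax
    try clear w_rcx
    try clear w_r14
    try clear w_rdi
    try clear hbr_111600
    try clear w_acc_1115f4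
    try clear hbr_11161b
    clear hmw3 hcw3 hfoff
    have hjlt := hltC hbr_1115da
    have hun : ShadowUntouched v.mem s_11160d.mem := by v_untouched
    refine s9_chk_obj hf hun 512 1024 (Or.inr (Or.inr (Or.inl ⟨rfl, rfl⟩))) _ 4 (by omega) ?_ ?_
    · u_omega
    · u_omega
  · -- side_code: the return address of the next check call is stored off the text
    try clear w_rax
    try clear w_rcx
    try clear w_r14
    try clear w_rdi
    try clear hbr_111600
    try clear w_acc_1115f4
    try clear hbr_11161b
    clear hmw3 hcw3 hfoff
    u_omega
  · -- check_111578: `do_not_decode[ch]`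
    try clear w_rax
    try clear w_rcx
    try clear w_r14
    try clear w_rdi
    try clear hbr_111600
    try clear w_acc_1115f4
    try clear hbr_11161b
    clear hmw3 hcw3 hfoff
    have hjlt := hltC hbr_1115da
    have hun : ShadowUntouched v.mem s_111578.mem := by v_untouched
    refine s9_chk_obj hf hun 192 256 (Or.inr (Or.inl ⟨rfl, rfl⟩)) _ 1 (by omega) ?_ ?_
    · u_omega
    · u_omega
  · -- side_code: the return address of the next check call is stored off the text
    try clear w_rax
    try clear w_rcx
    try clear w_r14
    try clear w_rdi
    try clear hbr_111600
    try clear w_acc_1115f4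
    try clear hbr_11161b
    clear hmw3 hcw3 hfoff
    u_omega
  · -- check_111599: `f->channel_buffers[j]`
    try clear w_rax
    try clear w_rcx
    try clear w_r14
    try clear w_rdi
    try clear hbr_111600
    try clear w_acc_1115f4
    try clear hbr_11161b
    clear hmw3 hcw3 hfoff
    have hjlt := hltC hbr_1115da
    have hun : ShadowUntouched v.mem s_111599.mem := by v_untouched
    refine s9_chk_f hf hun _ (872 + 8 * j) 8 (by omega) (by omega) ?_
    u_omega
  · -- side_code: the return address of the next check call is stored off the text
    try clear w_rax
    try clear w_rcx
    try clear w_r14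
    try clear w_rdi
    try clear hbr_111600
    try clear w_acc_1115f4
    try clear hbr_11161b
    clear hmw3 hcw3 hfoff
    u_omega
  · -- check_1115b3: `residue_buffers[ch]`
    try clear w_rax
    try clear w_rcx
    try clear w_r14
    try clear w_rdi
    try clear hbr_111600
    try clear w_acc_1115f4
    try clear hbr_11161b
    clear hmw3 hcw3 hfoff
    have hjlt := hltC hbr_1115da
    have hun : ShadowUntouched v.mem s_1115b3.mem := by v_untouched
    refine s9_chk_obj hf hun 32 128 (Or.inl ⟨rfl, rfl⟩) _ 8 (by omega) ?_ ?_
    · u_omega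
    · u_omega
  · -- side_code: the return address of the next check call is stored off the text
    try clear w_rax
    try clear w_rcx
    try clear w_r14
    try clear w_rdi
    try clear hbr_111600
    try clear w_acc_1115f4
    try clear hbr_11161b
    clear hmw3 hcw3 hfoff
    u_omega
  · -- check_11162c: `do_not_decode[ch]`
    try clear w_rax
    try clear w_rcx
    try clear w_r14
    try clear w_rdi
    try clear hbr_111600
    try clear w_acc_1115f4
    try clear hbr_11161b
    clear hmw3 hcw3 hfoff
    have hjlt := hltC hbr_1115da
    have hun : ShadowUntouched v.mem s_11162c.mem := by v_untouched
    refine s9_chk_obj hf hun 192 256 (Or.inr (Or.inl ⟨rfl, rfl⟩)) _ 1 (by omega) ?_ ?_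
    · u_omega
    · u_omega
  · -- side_code: the return address of the next check call is stored off the text
    try clear w_rax
    try clear w_rcx
    try clear w_r14
    try clear w_rdi
    try clear hbr_111600
    try clear w_acc_1115f4
    try clear hbr_11161b
    clear hmw3 hcw3 hfoff
    u_omega
  · -- check_111642: `residue_buffers[ch]`
    try clear w_rax
    try clear w_rcx
    try clear w_r14
    try clear w_rdi
    try clear hbr_111600
    try clear w_acc_1115f4
    try clear hbr_11161b
    clear hmw3 hcw3 hfoff
    have hjlt := hltC hbr_1115da
    have hun : ShadowUntouched v.mem s_111642.mem := by v_untouched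
    refine s9_chk_obj hf hun 32 128 (Or.inl ⟨rfl, rfl⟩) _ 8 (by omega) ?_ ?_
    · u_omega
    · u_omega
  · -- 0x1115da taken: `j ≥ C`, to 0x111658
    clear hmw3 hcw3 hfoff hbr_1115da
    have hs : Mem.SameExcept (ownWins (e.reg .rsp).toNat) v.mem s_1115da.mem := by
      unfold ownWins
      u_same
    have habi : abiInv s_1115da := by v_inv
    have ksb : ∀ x, v.mem.readLE (e.reg .rsp - 2992) 8 = x → s_1115da.mem.readLE (e.reg .rsp - 2992) 8 = x := by
      intro x hx
      rw [w_mem]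
      u_read
    refine ReachVia.done (Or.inl ?_)
    refine s9_inner_of hat hs w_rsp w_eq habi (w_kept .r15 rfl) (w_kept .r12 rfl) (w_kept .rbp rfl) ksb _ j ch w_rip
      ?_ ?_ hchle hat.j_le ?_
    · rw [w_kept .rbx rfl]
      exact hrbx
    · rw [w_kept .r13 rfl]
      exact hr13
    · intro k hk
      have hsa : (addr ((e.reg .rsp).toNat - 3000 + 320 + k)).toNat = (e.reg .rsp).toNat - 3000 + 320 + k :=
        toNat_addr _ (by omega)
      have hsb : (addr ((e.reg .rsp).toNat - 3000 + 160 + 8 * k)).toNat = (e.reg .rsp).toNat - 3000 + 160 + 8 * k :=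
        toNat_addr _ (by omega)
      refine s9_RB_keep (hat.rb k hk) ?_ ?_
      · intro x hx
        rw [w_mem]
        u_read
      · intro x hx
        rw [w_mem]
        u_read
  · -- 0x111600 taken: `map->chan[j].mux ≠ i`; `++j`
    try clear w_rax
    try clear w_rcx
    try clear w_r14
    try clear w_rdi
    try clear hbr_111600
    try clear w_acc_1115f4
    try clear hbr_11161b
    clear hmw3 hcw3 hfoff
    have hjlt := hltC hbr_1115da
    have hs : Mem.SameExcept (ownWins (e.reg .rsp).toNat) v.mem s_1115c8.mem := by
      unfold ownWins
      u_same
    have habi : abiInv s_1115c8 := by v_inv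
    have ksb : ∀ x, v.mem.readLE (e.reg .rsp - 2992) 8 = x → s_1115c8.mem.readLE (e.reg .rsp - 2992) 8 = x := by
      intro x hx
      rw [w_mem]
      u_read
    have hbx : s_1115c8.reg .rbx = UInt64.ofNat (j + 1) := by
      rw [w_rbx, cnt32_succ_bv, cnt32_ofBV _ (by omega)]
    refine ReachVia.done (Or.inr (Or.inl ?_))
    refine s9_inner_of hat hs w_rsp w_eq habi (w_kept .r15 rfl) (w_kept .r12 rfl) (w_kept .rbp rfl) ksb _ (j + 1) ch w_rip
      hbx ?_ (by omega) (by rw [hCdef]; omega) ?_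
    · rw [w_kept .r13 rfl]
      exact hr13
    · intro k hk
      have hsa : (addr ((e.reg .rsp).toNat - 3000 + 320 + k)).toNat = (e.reg .rsp).toNat - 3000 + 320 + k :=
        toNat_addr _ (by omega)
      have hsb : (addr ((e.reg .rsp).toNat - 3000 + 160 + 8 * k)).toNat = (e.reg .rsp).toNat - 3000 + 160 + 8 * k :=
        toNat_addr _ (by omega)
      refine s9_RB_keep (hat.rb k hk) ?_ ?_
      · intro x hx
        rw [w_mem]
        u_read
      · intro x hx
        rw [w_mem]
        u_read
  · -- `zero_channel[j] = 0`: `do_not_decode[ch] = 0`, `residue_buffers[ch] = f->channel_buffers[j]`; `++ch`, `++j`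
    try clear w_rax
    try clear w_rcx
    try clear w_r14
    try clear w_rdi
    try clear hbr_111600
    try clear w_acc_1115f4
    try clear hbr_11161b
    clear hmw3 hcw3
    have hbx : s_1115c8.reg .rbx = UInt64.ofNat (j + 1) := by
      rw [w_rbx, cnt32_succ_bv, cnt32_ofBV _ (by omega)]
    have h13 : s_1115c8.reg .r13 = UInt64.ofNat (ch + 1) := by
      rw [w_r13, cnt32_succ_bv, cnt32_ofBV _ (by omega)]
    clear w_rbx w_r13
    have hjlt := hltC hbr_1115da
    -- the store addresses as numbers
    have eA : e.reg .rsp - 3000 + UInt64.ofNat ch + 320 = addr ((e.reg .rsp).toNat - 3000 + 320 + ch) := by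
      apply eq_addr
      u_omega
    have eB : e.reg .rsp - 3000 + UInt64.ofNat ch * 8 + 160 = addr ((e.reg .rsp).toNat - 3000 + 160 + 8 * ch) := by
      apply eq_addr
      u_omega
    have eF : addr (e.reg .rdi).toNat + (UInt64.ofNat j + 108) * 8 + 8 = addr ((e.reg .rdi).toNat + 872 + 8 * j) := by
      apply eq_addr
      u_omega
    have hA : (addr ((e.reg .rsp).toNat - 3000 + 320 + ch)).toNat = (e.reg .rsp).toNat - 3000 + 320 + ch :=
      toNat_addr _ (by omega)
    have hB : (addr ((e.reg .rsp).toNat - 3000 + 160 + 8 * ch)).toNat = (e.reg .rsp).toNat - 3000 + 160 + 8 * ch :=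
      toNat_addr _ (by omega)
    have hF : (addr ((e.reg .rdi).toNat + 872 + 8 * j)).toNat = (e.reg .rdi).toNat + 872 + 8 * j :=
      toNat_addr _ (by omega)
    rw [eF] at hcb
    simp only [eA, eB, eF] at w_mem
    clear eA eB eF
    have hs : Mem.SameExcept (ownWins (e.reg .rsp).toNat) v.mem s_1115c8.mem := by
      unfold ownWins
      u_same
    have habi : abiInv s_1115c8 := by v_inv
    have ksb : ∀ x, v.mem.readLE (e.reg .rsp - 2992) 8 = x → s_1115c8.mem.readLE (e.reg .rsp - 2992) 8 = x := by
      intro x hx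
      rw [w_mem]
      u_read
    refine ReachVia.done (Or.inr (Or.inr ?_))
    refine s9_inner_of hat hs w_rsp w_eq habi (w_kept .r15 rfl) (w_kept .r12 rfl) (w_kept .rbp rfl) ksb _ (j + 1) (ch + 1)
      w_rip hbx h13 (by omega) (by rw [hCdef]; omega) ?_
    intro k hk
    have hsa : (addr ((e.reg .rsp).toNat - 3000 + 320 + k)).toNat = (e.reg .rsp).toNat - 3000 + 320 + k :=
      toNat_addr _ (by omega)
    have hsb : (addr ((e.reg .rsp).toNat - 3000 + 160 + 8 * k)).toNat = (e.reg .rsp).toNat - 3000 + 160 + 8 * k :=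
      toNat_addr _ (by omega)
    rcases Nat.lt_or_ge k ch with hkc | hkc
    · refine s9_RB_keep (hat.rb k hkc) ?_ ?_
      · intro x hx
        rw [w_mem]
        u_read
      · intro x hx
        rw [w_mem]
        u_read
    · have hkc' : k = ch := by omega
      rw [hkc']
      unfold s9_RB step2FlagAt residueBuffersAt
      refine Or.inl ⟨?_, j, ?_, ?_⟩
      · unfold Mem.u8
        rw [w_mem]
        u_read
      · rw [nchan_def] at hCdef
        omega
      · rw [← hcb]
        generalize hcbv : v.mem.readLE (addr ((e.reg .rdi).toNat + 872 + 8 * j)) 8 = cb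
        simp only [vacc]
        unfold Mem.u64
        rw [w_mem, Mem.readLE_writeLE_same _ _ _ _ (by decide), s9_ofNat_readLE8]
        u_read
  · -- `zero_channel[j] ≠ 0`: `do_not_decode[ch] = 1`, `residue_buffers[ch] = NULL`; `++ch`, `++j`
    try clear w_rax
    try clear w_rcx
    try clear w_r14
    try clear w_rdi
    try clear hbr_111600
    try clear w_acc_1115f4
    try clear hbr_11161b
    clear hmw3 hcw3
    have hbx : s_1115c8.reg .rbx = UInt64.ofNat (j + 1) := by
      rw [w_rbx, cnt32_succ_bv, cnt32_ofBV _ (by omega)]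
    have h13 : s_1115c8.reg .r13 = UInt64.ofNat (ch + 1) := by
      rw [w_r13, cnt32_succ_bv, cnt32_ofBV _ (by omega)]
    clear w_rbx w_r13
    have hjlt := hltC hbr_1115da
    -- the store addresses as numbers
    have eA : e.reg .rsp - 3000 + UInt64.ofNat ch + 320 = addr ((e.reg .rsp).toNat - 3000 + 320 + ch) := by
      apply eq_addr
      u_omega
    have eB : e.reg .rsp - 3000 + UInt64.ofNat ch * 8 + 160 = addr ((e.reg .rsp).toNat - 3000 + 160 + 8 * ch) := by
      apply eq_addr
      u_omega
    have eF : addr (e.reg .rdi).toNat + (UInt64.ofNat j + 108) * 8 + 8 = addr ((e.reg .rdi).toNat + 872 + 8 * j) := by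
      apply eq_addr
      u_omega
    have hA : (addr ((e.reg .rsp).toNat - 3000 + 320 + ch)).toNat = (e.reg .rsp).toNat - 3000 + 320 + ch :=
      toNat_addr _ (by omega)
    have hB : (addr ((e.reg .rsp).toNat - 3000 + 160 + 8 * ch)).toNat = (e.reg .rsp).toNat - 3000 + 160 + 8 * ch :=
      toNat_addr _ (by omega)
    have hF : (addr ((e.reg .rdi).toNat + 872 + 8 * j)).toNat = (e.reg .rdi).toNat + 872 + 8 * j :=
      toNat_addr _ (by omega)
    rw [eF] at hcb
    simp only [eA, eB] at w_mem
    clear eA eB eF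
    have hs : Mem.SameExcept (ownWins (e.reg .rsp).toNat) v.mem s_1115c8.mem := by
      unfold ownWins
      u_same
    have habi : abiInv s_1115c8 := by v_inv
    have ksb : ∀ x, v.mem.readLE (e.reg .rsp - 2992) 8 = x → s_1115c8.mem.readLE (e.reg .rsp - 2992) 8 = x := by
      intro x hx
      rw [w_mem]
      u_read
    refine ReachVia.done (Or.inr (Or.inr ?_))
    refine s9_inner_of hat hs w_rsp w_eq habi (w_kept .r15 rfl) (w_kept .r12 rfl) (w_kept .rbp rfl) ksb _ (j + 1) (ch + 1)
      w_rip hbx h13 (by omega) (by rw [hCdef]; omega) ?_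
    intro k hk
    have hsa : (addr ((e.reg .rsp).toNat - 3000 + 320 + k)).toNat = (e.reg .rsp).toNat - 3000 + 320 + k :=
      toNat_addr _ (by omega)
    have hsb : (addr ((e.reg .rsp).toNat - 3000 + 160 + 8 * k)).toNat = (e.reg .rsp).toNat - 3000 + 160 + 8 * k :=
      toNat_addr _ (by omega)
    rcases Nat.lt_or_ge k ch with hkc | hkc
    · refine s9_RB_keep (hat.rb k hkc) ?_ ?_
      · intro x hx
        rw [w_mem]
        u_read
      · intro x hx
        rw [w_mem]
        u_read
    · have hkc' : k = ch := by omega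
      rw [hkc']
      unfold s9_RB step2FlagAt residueBuffersAt
      refine Or.inr ⟨?_, ?_⟩
      · unfold Mem.u8
        rw [w_mem]
        u_read
      · simp only [vacc]
        unfold Mem.u64
        rw [w_mem]
        u_read

/-- `do_not_decode[k]`: the object's address and the slot's are the same number. -/
theorem s9_dnd_addr (R k : Nat) (h : 0x700000 + 3856 ≤ R) : R - 2872 + 192 + k = R - 3000 + 0x140 + k := by
  omega

/-- `residue_buffers[k]`: the object's address and the slot's are the same number. -/
theorem s9_rb_addr (R k : Nat) (h : 0x700000 + 3856 ≤ R) : R - 2872 + 32 + 8 * k = R - 3000 + 0xa0 + 8 * k := by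
  omega

/-- **The precondition of decode_residue at the call 0x111685**, from the raw facts about the state `c` at the callee's entry: its
memory differs from that of the state `v` with `Inner` (at 0x111658) inside `ownWins` only (two pushed return addresses), RB(k)
for `k < ch` still reads in it, and the six argument registers hold what the code put there. -/
theorem s9_dr_pre {i j ch : Nat} {c : State}
    (hat : Inner u₀ others frames len Ar stored room mode ysz e ret 0x111658 i j ch v)
    (hs : Mem.SameExcept (ownWins (e.reg .rsp).toNat) v.mem c.mem)
    (hrb : ∀ k, k < ch → s9_RB e v.mem c.mem k)
    (hrsp : (c.reg .rsp).toNat = (e.reg .rsp).toNat - 3008)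
    (hrdi : (c.reg .rdi).toNat = fOf e)
    (hrsi : (c.reg .rsi).toNat = (e.reg .rsp).toNat - 2872 + 32)
    (hr9 : (c.reg .r9).toNat = (e.reg .rsp).toNat - 2872 + 192)
    (hrdx : (c.reg .rdx).toNat % 2 ^ 32 = ch)
    (hrcx : (c.reg .rcx).toNat % 2 ^ 32 = nOf v.mem (fOf e) (mOf e) / 2)
    (hr8 : (c.reg .r8).toNat % 2 ^ 32 =
      Mapping.submap_residue v.mem (mapOf v.mem (fOf e) (mOf e)) i) :
    DecodeResidue.Pre len Ar others (framesIn frames e) stored room ysz c := by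
  have he := hat.entry
  u_entry he
  simp only [vspec, Vorbis.conv_stackLo, Vorbis.conv_stackHi] at he_room he_top
  obtain ⟨hsh0, hinv0, hargs0⟩ := hat.pre
  have hf := hat.toStable.toFrame
  obtain ⟨hsh', hinv'⟩ := inv_own hat.toStable hs
  obtain ⟨hk, cn, cmap, cch⟩ := own_cfg hat.toStable hs
  have hob := hk _ hat.inv.ob1
  have hC16 := hat.inv.config.header.HD1.2
  have hC1 := hat.inv.config.header.HD1.1
  have ech : stb_vorbis.channels c.mem (fOf e) = stb_vorbis.channels v.mem (fOf e) := by
    simp only [vacc, voff]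
    exact hob.i32 _ (by simp only [vblock, voff]; omega) (by simp only [vblock, voff]; omega)
  have ebuf : ∀ k : Nat, (k : Int) < stb_vorbis.channels v.mem (fOf e) →
      stb_vorbis.channel_buffers c.mem (fOf e) k = stb_vorbis.channel_buffers v.mem (fOf e) k := by
    intro k hk
    simp only [vacc, voff]
    exact hob.u64 _ (by simp only [vblock, voff]; omega) (by simp only [vblock, voff]; omega)
  have erc : stb_vorbis.residue_count c.mem (fOf e) = stb_vorbis.residue_count v.mem (fOf e) := by
    simp only [vacc, voff]
    exact hob.i32 _ (by simp only [vblock, voff]; omega) (by simp only [vblock, voff]; omega)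
  have hb1 : bsize c.mem (fOf e) 1 = bsize v.mem (fOf e) 1 := by
    unfold bsize
    simp only [Nat.one_ne_zero, if_false, vacc, voff]
    rw [hob.i32 (fOf e + 156) (by simp only [vblock, voff]; omega) (by simp only [vblock, voff]; omega)]
  have hnr := nOf_range hat.inv.config.header.HD3 (mOf e)
  have hch16 : nchan v.mem (fOf e) ≤ 16 := by
    rw [nchan_def]
    omega
  have hjle := hat.j_le
  have hchle := hat.ch_le
  refine ⟨⟨?_, hsh0.offText⟩, ?_, ?_⟩
  · have etop : (c.reg .rsp).toNat + 8 = (spOf e).toNat := by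
      rw [hrsp]
      u_omega
    rw [etop]
    exact hsh'
  · rw [hrdi]
    exact hinv'
  · rw [hrdi, hrcx, hrdx, hrsi, hr9, hr8]
    refine ⟨?_, ?_, ?_, ?_, ?_, ?_, ?_, ?_, ?_, ?_⟩
    · -- MP6
      rw [erc]
      exact (s9_map_ok hf he_room).residue_lt hat.i_lt
    · omega
    · rw [hb1]
      omega
    · rw [cch]
      omega
    · refine ⟨_, frame_obj_mem others frames e 32 128 (Or.inl ⟨rfl, rfl⟩), ?_, ?_⟩
      · simp only []
        omega
      · simp only []
        omega
    · refine ⟨_, frame_obj_mem others frames e 192 256 (Or.inr (Or.inl ⟨rfl, rfl⟩)), ?_, ?_⟩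
      · simp only []
        omega
      · simp only []
        omega
    · rw [hrsp]
      omega
    · rw [hrsp]
      omega
    · intro k hk hnd
      have hR := hrb k hk
      unfold s9_RB step2FlagAt residueBuffersAt at hR
      unfold DND at hnd
      have e1 := s9_dnd_addr (e.reg .rsp).toNat k he_room
      have e2 := s9_rb_addr (e.reg .rsp).toNat k he_room
      rw [e1] at hnd
      rw [e2]
      rcases hR with ⟨h0, cc, hcc, hp⟩ | ⟨h1, hp⟩
      · refine ⟨cc, ?_, ?_, ?_⟩
        · rw [ech]
          exact hcc
        · rw [ebuf cc hcc]
          exact hp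
        · rw [hp, ← ebuf cc hcc]
          exact hinv'.chanLive (by rw [ech]; exact hcc) (by rw [hb1]; omega)
      · exact absurd (by rw [h1]; decide) hnd
    · intro k hk hd
      have hR := hrb k hk
      unfold s9_RB step2FlagAt residueBuffersAt at hR
      unfold DND at hd
      have e1 := s9_dnd_addr (e.reg .rsp).toNat k he_room
      have e2 := s9_rb_addr (e.reg .rsp).toNat k he_room
      rw [e1] at hd
      rw [e2]
      rcases hR with ⟨h0, cc, hcc, hp⟩ | ⟨h1, hp⟩
      · exact absurd h0 hd
      · exact hp


end s9

end Vorbis.Spec.vorbis_decode_packet_rest_9
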